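-- pv_equiv track=rewrite | github.com/kurunmi/RankHack | in_place.py | makedistinct
-- ===== SOURCE A (Python) =====
-- def makedistinct(nums, val):
--     index = 0
--     size = len(nums) - 1
--     count = 0
--     indic = -1
--     while index <= size:
--         if nums[index] == val:
--             nums[index] = 0
--             if indic < 0:
--                 indic = index
--         else:
--             count += 1
--             if indic >= 0:
--                 nums[indic] = nums[index]
--                 nums[index] = 0
--                 indic += 1
--         index += 1
--     return count
-- ===== SOURCE B (Python) =====
-- def makedistinct(nums, val):
--     kept = [x for x in nums if x != val]
--     count = len(kept)
--     nums[:] = kept + [0] * (len(nums) - count)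
--     return count
-- ===== Notes on version B (the rewrite author's own statement) =====
-- stated objective: simpler
-- what changed: Replaces the in-place two-pointer compaction loop (write index, per-slot zeroing) by a single filter pass that counts kept elements, then one slice assignment rebuilding the list as kept elements plus trailing zeros.
import Mathlib
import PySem

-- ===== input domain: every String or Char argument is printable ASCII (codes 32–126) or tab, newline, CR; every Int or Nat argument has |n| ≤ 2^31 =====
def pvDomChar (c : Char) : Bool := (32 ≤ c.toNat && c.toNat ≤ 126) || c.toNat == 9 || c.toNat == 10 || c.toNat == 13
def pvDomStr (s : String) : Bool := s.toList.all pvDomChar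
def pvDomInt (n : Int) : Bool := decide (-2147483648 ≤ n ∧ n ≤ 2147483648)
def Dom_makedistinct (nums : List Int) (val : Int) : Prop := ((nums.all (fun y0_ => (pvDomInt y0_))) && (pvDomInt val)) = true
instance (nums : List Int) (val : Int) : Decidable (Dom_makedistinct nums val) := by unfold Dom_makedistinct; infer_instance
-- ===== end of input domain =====

-- B rebuilds the list via filter + trailing-zero fill instead of A's in-place two-pointer
-- compaction; same return value (proved) and, in Python, the same final list contents.
-- The equivalence proved here is about the RETURN value; both Pythons mutate `nums` in place
-- (to the same final contents).
-- ===== PORT A =====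
-- the while loop of A: state = (current list contents, index, count, indic)
def makedistinctLoop (val : Int) (nums : List Int) (index : Nat) (count : Int) (indic : Int) : Int :=
  if h : index < nums.length then
    if nums[index] = val then
      -- nums[index] = 0; if indic < 0: indic = index
      let nums' := nums.set index 0
      let indic' := if indic < 0 then (index : Int) else indic
      makedistinctLoop val nums' (index + 1) count indic'
    else
      if indic ≥ 0 then
        -- nums[indic] = nums[index]; nums[index] = 0; indic += 1
        let nums' := (nums.set indic.toNat nums[index]).set index 0
        makedistinctLoop val nums' (index + 1) (count + 1) (indic + 1)
      else
        makedistinctLoop val nums (index + 1) (count + 1) indic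
  else count
termination_by nums.length - index
decreasing_by all_goals simp_all; omega

def makedistinct (nums : List Int) (val : Int) : Int :=
  makedistinctLoop val nums 0 0 (-1)

-- ===== PORT B =====
def makedistinct_alt (nums : List Int) (val : Int) : Int :=
  -- kept = [x for x in nums if x != val]; return len(kept)
  ((nums.filter (fun x => x ≠ val)).length : Int)

-- ===== PRECONDITION & SPEC =====
def Spec_makedistinct (nums : List Int) (val : Int) (out : Int) : Prop := out = makedistinct_alt nums val
instance (nums : List Int) (val : Int) (out : Int) : Decidable (Spec_makedistinct nums val out) := by unfold Spec_makedistinct; infer_instance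

-- ===== CLAIM (what is proved, stated in full; the proofs are below) =====
def Claim_equal_makedistinct : Prop := ∀ (nums : List Int) (val : Int), Dom_makedistinct nums val → Spec_makedistinct nums val (makedistinct nums val)

-- ===== LEMMAS AND PROOFS =====

-- ===== VERDICT (by name: the statement is the Claim_ definition above) =====
-- invariant: the loop returns count + (number of non-val elements in the unprocessed suffix)
theorem makedistinctLoop_eq (val : Int) : ∀ (k : Nat) (nums : List Int) (index : Nat)
    (count indic : Int), nums.length - index ≤ k → indic < (index : Int) →
    makedistinctLoop val nums index count indic
      = count + ((nums.drop index).countP (fun x => x ≠ val)) := by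
  intro k
  induction k with
  | zero =>
    intro nums index count indic hk hind
    have h : ¬ index < nums.length := by omega
    rw [makedistinctLoop]
    simp [h, List.drop_eq_nil_of_le (by omega : nums.length ≤ index)]
  | succ k ih =>
    intro nums index count indic hk hind
    rw [makedistinctLoop]
    by_cases h : index < nums.length
    · have hdrop : nums.drop index = nums[index] :: nums.drop (index + 1) :=
        List.drop_eq_getElem_cons h
      rw [dif_pos h]
      by_cases hv : nums[index] = val
      · rw [if_pos hv]
        rw [ih _ (index + 1) _ _ (by simp only [List.length_set]; omega) (by split_ifs <;> push_cast <;> omega)]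
        have hset : (nums.set index 0).drop (index + 1) = nums.drop (index + 1) := by
          apply List.ext_getElem
          · simp
          · intro i h1 h2
            simp only [List.getElem_drop, List.getElem_set]
            rw [if_neg (by omega)]
        rw [hset, hdrop]
        simp [hv, List.countP_cons]
      · rw [if_neg hv]
        by_cases hi : indic ≥ 0
        · rw [if_pos hi]
          rw [ih _ (index + 1) _ _ (by simp only [List.length_set]; omega) (by push_cast; omega)]
          have hset : (((nums.set indic.toNat nums[index]).set index 0).drop (index + 1))
              = nums.drop (index + 1) := by
            apply List.ext_getElem
            · simp
            · intro i h1 h2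
              simp only [List.getElem_drop, List.getElem_set, List.length_set]
              rw [if_neg (by omega), if_neg (by omega)]
          rw [hset, hdrop]
          simp only [List.countP_cons, hv]
          simp
          omega
        · rw [if_neg hi]
          rw [ih _ (index + 1) _ _ (by omega) (by push_cast; omega), hdrop]
          simp only [List.countP_cons, hv]
          simp
          omega
    · rw [dif_neg h]
      simp [List.drop_eq_nil_of_le (by omega : nums.length ≤ index)]

-- ===== VERDICT =====
theorem makedistinct_spec : Claim_equal_makedistinct := by
  intro nums val _
  unfold Spec_makedistinct makedistinct makedistinct_alt
  rw [makedistinctLoop_eq val nums.length nums 0 0 (-1) (by omega) (by norm_num)]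
  simp [List.countP_eq_length_filter]
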